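-- pv_equiv track=rewrite | github.com/followthesapper/phaselab | experiments/E201_SCN2A_CRISPRa/Code/E201_scn2a_crispra.py | check_homopolymers
-- ===== SOURCE A (Python) =====
-- from typing import Dict, List, Tuple, Optional
--
-- def check_homopolymers(guide: str) -> Dict[str, int]:
--     """Check for problematic homopolymer runs."""
--     runs = {}
--     for base in 'ATGC':
--         max_run = 0
--         current_run = 0
--         for b in guide:
--             if b == base:
--                 current_run += 1
--                 max_run = max(max_run, current_run)
--             else:
--                 current_run = 0
--         runs[base] = max_run
--     return runs
-- ===== SOURCE B (Python) =====
-- def check_homopolymers(guide: str) -> dict: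
--     """Check for problematic homopolymer runs (single pass)."""
--     mA = mT = mG = mC = 0
--     prev = None
--     run = 0
--     for b in guide:
--         if b == prev:
--             run += 1
--         else:
--             prev = b
--             run = 1
--         if b == 'A':
--             if run > mA:
--                 mA = run
--         elif b == 'T':
--             if run > mT:
--                 mT = run
--         elif b == 'G':
--             if run > mG:
--                 mG = run
--         elif b == 'C':
--             if run > mC:
--                 mC = run
--     return {'A': mA, 'T': mT, 'G': mG, 'C': mC}
-- ===== Notes on version B (the rewrite author's own statement) =====
-- stated objective: alternative
-- what changed: Replaces four separate per-base scans of the guide with one single pass that tracks the current run length and updates four max counters.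
import Mathlib
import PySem

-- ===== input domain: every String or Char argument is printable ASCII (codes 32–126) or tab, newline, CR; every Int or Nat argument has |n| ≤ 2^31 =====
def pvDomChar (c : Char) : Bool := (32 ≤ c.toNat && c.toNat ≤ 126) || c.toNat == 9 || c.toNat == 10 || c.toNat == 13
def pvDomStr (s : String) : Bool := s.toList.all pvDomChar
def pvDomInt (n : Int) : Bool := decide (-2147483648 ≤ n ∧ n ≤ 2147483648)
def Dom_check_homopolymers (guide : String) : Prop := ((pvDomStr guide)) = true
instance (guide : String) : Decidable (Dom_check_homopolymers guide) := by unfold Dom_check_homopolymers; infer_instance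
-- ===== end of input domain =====

-- B replaces A's four per-base scans of the guide with one single pass over the string (objective: alternative).

-- ===== PORT A =====
-- inner loop of A for one base: state (max_run, current_run)
def pvAInner (base : Char) (guide : List Char) : Int :=
  (guide.foldl
    (fun (s : Int × Int) b =>
      if b = base then (max s.1 (s.2 + 1), s.2 + 1) else (s.1, 0))
    (0, 0)).1

def check_homopolymers (guide : String) : List (String × Int) :=
  (['A', 'T', 'G', 'C'].foldl
    (fun (runs : PySem.Dict String Int) base =>
      runs.insert (String.ofList [base]) (pvAInner base guide.toList))
    PySem.Dict.empty).items

-- ===== PORT B =====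
-- single pass; state (prev, run, mA, mT, mG, mC)
def pvBStep (s : Option Char × Int × Int × Int × Int × Int) (b : Char) :
    Option Char × Int × Int × Int × Int × Int :=
  let (prev, run, mA, mT, mG, mC) := s
  let run' := if prev = some b then run + 1 else 1
  if b = 'A' then (some b, run', if run' > mA then run' else mA, mT, mG, mC)
  else if b = 'T' then (some b, run', mA, if run' > mT then run' else mT, mG, mC)
  else if b = 'G' then (some b, run', mA, mT, if run' > mG then run' else mG, mC)
  else if b = 'C' then (some b, run', mA, mT, mG, if run' > mC then run' else mC)
  else (some b, run', mA, mT, mG, mC)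

def check_homopolymers_alt (guide : String) : List (String × Int) :=
  let s := guide.toList.foldl pvBStep (none, 0, 0, 0, 0, 0)
  [("A", s.2.2.1), ("T", s.2.2.2.1), ("G", s.2.2.2.2.1), ("C", s.2.2.2.2.2)]

-- ===== PRECONDITION & SPEC =====
def Spec_check_homopolymers (guide : String) (out : List (String × Int)) : Prop := out = check_homopolymers_alt guide
instance (guide : String) (out : List (String × Int)) : Decidable (Spec_check_homopolymers guide out) := by unfold Spec_check_homopolymers; infer_instance

-- ===== CLAIM (what is proved, stated in full; the proofs are below) =====
def Claim_equal_check_homopolymers : Prop := ∀ (guide : String), Dom_check_homopolymers guide → Spec_check_homopolymers guide (check_homopolymers guide)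

-- ===== LEMMAS AND PROOFS =====

-- A's fold for one base, from an arbitrary state
def pvAFold (base : Char) (l : List Char) (s : Int × Int) : Int × Int :=
  l.foldl (fun s b => if b = base then (max s.1 (s.2 + 1), s.2 + 1) else (s.1, 0)) s

-- "current run of base b" as seen from B's state
def pvSel (prev : Option Char) (run : Int) (b : Char) : Int :=
  if prev = some b then run else 0

-- one A-step, written as a state transformation matching what B's step does for base b
theorem pv_state_step (b c : Char) (prev : Option Char) (run m : Int) :
    (if c = b then (max m (pvSel prev run b + 1), pvSel prev run b + 1) else (m, 0))
    = ((if c = b then (if (if prev = some c then run + 1 else 1) > m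
                        then (if prev = some c then run + 1 else 1) else m) else m),
       pvSel (some c) (if prev = some c then run + 1 else 1) b) := by
  unfold pvSel
  by_cases hcb : c = b
  · subst hcb
    by_cases hp : prev = some c
    · simp only [if_pos hp, Prod.ext_iff]
      refine ⟨?_, ?_⟩ <;> simp <;> omega
    · simp only [if_neg hp, Prod.ext_iff]
      refine ⟨?_, ?_⟩ <;> simp <;> omega
  · have hbc : ¬ ((some c : Option Char) = some b) := by
      intro h; exact hcb (Option.some.injEq .. ▸ h)
    simp [hcb, hbc]

theorem pv_main (l : List Char) :
    ∀ (prev : Option Char) (run mA mT mG mC : Int),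
      (pvAFold 'A' l (mA, pvSel prev run 'A')).1 = (l.foldl pvBStep (prev, run, mA, mT, mG, mC)).2.2.1 ∧
      (pvAFold 'T' l (mT, pvSel prev run 'T')).1 = (l.foldl pvBStep (prev, run, mA, mT, mG, mC)).2.2.2.1 ∧
      (pvAFold 'G' l (mG, pvSel prev run 'G')).1 = (l.foldl pvBStep (prev, run, mA, mT, mG, mC)).2.2.2.2.1 ∧
      (pvAFold 'C' l (mC, pvSel prev run 'C')).1 = (l.foldl pvBStep (prev, run, mA, mT, mG, mC)).2.2.2.2.2 := by
  induction l with
  | nil => intro prev run mA mT mG mC; exact ⟨rfl, rfl, rfl, rfl⟩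
  | cons c t ih =>
    intro prev run mA mT mG mC
    have hB : (c :: t).foldl pvBStep (prev, run, mA, mT, mG, mC) =
        t.foldl pvBStep (pvBStep (prev, run, mA, mT, mG, mC) c) := rfl
    have hstep : pvBStep (prev, run, mA, mT, mG, mC) c =
        (some c, (if prev = some c then run + 1 else 1),
          if c = 'A' then (if (if prev = some c then run + 1 else 1) > mA then (if prev = some c then run + 1 else 1) else mA) else mA,
          if c = 'T' then (if (if prev = some c then run + 1 else 1) > mT then (if prev = some c then run + 1 else 1) else mT) else mT,
          if c = 'G' then (if (if prev = some c then run + 1 else 1) > mG then (if prev = some c then run + 1 else 1) else mG) else mG,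
          if c = 'C' then (if (if prev = some c then run + 1 else 1) > mC then (if prev = some c then run + 1 else 1) else mC) else mC) := by
      simp only [pvBStep]
      split_ifs with h1 h2 h3 h4 <;> simp_all
    have hA : ∀ (b : Char) (m : Int),
        pvAFold b (c :: t) (m, pvSel prev run b) =
        pvAFold b t ((if c = b then (if (if prev = some c then run + 1 else 1) > m
                        then (if prev = some c then run + 1 else 1) else m) else m),
                     pvSel (some c) (if prev = some c then run + 1 else 1) b) := by
      intro b m
      rw [show pvAFold b (c :: t) (m, pvSel prev run b) =
            pvAFold b t (if c = b then (max m (pvSel prev run b + 1), pvSel prev run b + 1)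
                          else (m, 0)) from rfl]
      rw [pv_state_step]
    have iht := ih (some c) (if prev = some c then run + 1 else 1)
      (if c = 'A' then (if (if prev = some c then run + 1 else 1) > mA then (if prev = some c then run + 1 else 1) else mA) else mA)
      (if c = 'T' then (if (if prev = some c then run + 1 else 1) > mT then (if prev = some c then run + 1 else 1) else mT) else mT)
      (if c = 'G' then (if (if prev = some c then run + 1 else 1) > mG then (if prev = some c then run + 1 else 1) else mG) else mG)
      (if c = 'C' then (if (if prev = some c then run + 1 else 1) > mC then (if prev = some c then run + 1 else 1) else mC) else mC)
    rw [hB, hstep]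
    exact ⟨(hA 'A' mA) ▸ iht.1, (hA 'T' mT) ▸ iht.2.1,
           (hA 'G' mG) ▸ iht.2.2.1, (hA 'C' mC) ▸ iht.2.2.2⟩

-- A's dict has the four fresh distinct keys, so its items are the literal four-entry list
theorem pv_A_items (guide : String) :
    check_homopolymers guide =
      [("A", pvAInner 'A' guide.toList), ("T", pvAInner 'T' guide.toList),
       ("G", pvAInner 'G' guide.toList), ("C", pvAInner 'C' guide.toList)] := by
  rfl

-- ===== VERDICT (by name: the statement is the Claim_ definition above) =====
theorem check_homopolymers_spec : Claim_equal_check_homopolymers := by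
  intro guide _
  unfold Spec_check_homopolymers
  rw [pv_A_items]
  have h := pv_main guide.toList none 0 0 0 0 0
  simp only [check_homopolymers_alt]
  rw [show pvAInner 'A' guide.toList = (pvAFold 'A' guide.toList (0, pvSel none 0 'A')).1 from rfl,
      show pvAInner 'T' guide.toList = (pvAFold 'T' guide.toList (0, pvSel none 0 'T')).1 from rfl,
      show pvAInner 'G' guide.toList = (pvAFold 'G' guide.toList (0, pvSel none 0 'G')).1 from rfl,
      show pvAInner 'C' guide.toList = (pvAFold 'C' guide.toList (0, pvSel none 0 'C')).1 from rfl,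
      h.1, h.2.1, h.2.2.1, h.2.2.2]
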